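-- pv_equiv track=rewrite | github.com/hannabri/fine_tune_mbert | pre_treatment.py | multiword
-- ===== SOURCE A (Python) =====
-- def multiword(token, pos, id):
--     # function to "normalize PoS to compound PoS"
--     elements_to_delete = []
--
--     compound = True
--
--     # the "_" does not have a proper index in the UD, therefore
--     # we have to count and add the number of "_" present in the list
--     nb_comp = 0
--
--     while compound:
--
--         compound = False
--
--         if "_" in set(pos):
--
--             compound = True
--             # get index of the multiword token
--             index = pos.index("_")
--
--             # define starting and ending point for multiword token
--             start,_, end = id[index]
--
--             # change PoS to compound PoS
--             new_pos = [pos[i] for i in range(start+nb_comp, end+nb_comp+1)]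
--             pos[index] = "+".join(new_pos)
--
--             # delete the elements describing the token
--             elements_to_delete.extend([i for i in range(start+nb_comp, end+nb_comp+1)])
--             nb_comp+=1
--
--     pos_list = [j for i, j in enumerate(pos) if i not in elements_to_delete]
--     token_list = [j for i, j in enumerate(token) if i not in elements_to_delete]
--
--     return (token_list, pos_list)
-- ===== SOURCE B (Python) =====
-- def multiword(token, pos, id):
--     # One left-to-right pass: at each "_" read its (start,_,end) id, join the
--     # span of component tags that follows, and jump over the components.
--     # (Return-value equivalent to the original; does not mutate `pos` in place.)
--     pos_list = []
--     dead = set()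
--     i = 0
--     n = len(pos)
--     while i < n:
--         if pos[i] == "_":
--             start, _, end = id[i]
--             comps = pos[i + 1 : i + 1 + (end - start + 1)]
--             pos_list.append("+".join(comps))
--             dead.update(range(i + 1, i + 1 + len(comps)))
--             i += 1 + len(comps)
--         else:
--             pos_list.append(pos[i])
--             i += 1
--     token_list = [t for j, t in enumerate(token) if j not in dead]
--     return (token_list, pos_list)
-- ===== Notes on version B (the rewrite author's own statement) =====
-- stated objective: simpler
-- what changed: Replaces the while-loop that rescans pos with pos.index('_') and a global nb_comp offset (mutating pos and collecting indices to delete afterwards) by a single left-to-right pass that, at each '_', joins the span of component tags that follows it and jumps over them, emitting the output directly. Pre_ excludes inputs whose '_' entries are not well-aligned multiword blocks (id start/end consistent with the entry's position, component span in range and free of further '_'), on which A's global-offset arithmetic slices accidental positions or raises IndexError.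
-- outside the precondition, e.g. on multiword(['a'], ['_', 'y'], [(0, 0, 0), (0, 0, 0)]): A returns ([], []), B returns (['a'], ['y'])
import Mathlib
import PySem

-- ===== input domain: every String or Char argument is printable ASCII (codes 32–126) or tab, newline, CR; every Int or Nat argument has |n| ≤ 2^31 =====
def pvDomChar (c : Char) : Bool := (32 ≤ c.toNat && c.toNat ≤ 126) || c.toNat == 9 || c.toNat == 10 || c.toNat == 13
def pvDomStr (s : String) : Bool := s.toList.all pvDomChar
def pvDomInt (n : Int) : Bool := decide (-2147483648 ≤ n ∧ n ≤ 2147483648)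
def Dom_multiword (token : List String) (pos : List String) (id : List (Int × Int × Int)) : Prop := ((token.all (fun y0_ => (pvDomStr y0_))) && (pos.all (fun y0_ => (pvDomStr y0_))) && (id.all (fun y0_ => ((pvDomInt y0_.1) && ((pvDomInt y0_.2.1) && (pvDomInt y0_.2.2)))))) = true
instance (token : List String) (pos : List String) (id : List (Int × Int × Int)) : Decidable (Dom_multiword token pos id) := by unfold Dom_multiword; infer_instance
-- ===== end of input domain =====

-- B replaces A's rescanning while-loop (pos.index('_') + global nb_comp offset) by one
-- left-to-right pass that joins each '_' entry's component span and jumps over it; the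
-- Python A mutates `pos` in place, B does not — equivalence is about the return value only.

-- ===== PORT A =====
-- The while-loop of A. Fuel is a termination guard only: on inputs satisfying
-- Pre_multiword every iteration removes one "_" from pos, so pos.length + 1 iterations
-- always suffice to reach the `else` exit; in the `none` branches Python raises
-- (IndexError), which Pre_multiword excludes, so the value returned there is irrelevant.
def aLoop (id : List (Int × Int × Int)) : Nat → List String → List Int → Int → List String × List Int
  | 0, pos, del, _ => (pos, del)
  | fuel + 1, pos, del, nb =>
    if PySem.Set.contains (PySem.Set.ofList pos) "_" then
      match PySem.List.index? pos "_" with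
      | none => (pos, del)      -- unreachable: the membership test just succeeded
      | some idx =>
        match PySem.List.pyGet? id (idx : Int) with
        | none => (pos, del)    -- Python raises IndexError here
        | some (s, _, e) =>
          match (PySem.List.pyRange (s + nb) (e + nb + 1) 1).mapM (fun i => PySem.List.pyGet? pos i) with
          | none => (pos, del)  -- Python raises IndexError here
          | some newPos =>
            aLoop id fuel (pos.set idx (PySem.Str.join "+" newPos))
              (del ++ PySem.List.pyRange (s + nb) (e + nb + 1) 1) (nb + 1)
    else (pos, del)

def multiword (token : List String) (pos : List String) (id : List (Int × Int × Int)) : List String × List String :=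
  let r := aLoop id (pos.length + 1) pos [] 0
  (((PySem.List.enumerate token 0).filter (fun p => !(r.2.contains p.1))).map (·.2),
   ((PySem.List.enumerate r.1 0).filter (fun p => !(r.2.contains p.1))).map (·.2))

-- ===== PORT B =====
def bLoop (pos : List String) (id : List (Int × Int × Int)) (i : Nat)
    (posList : List String) (dead : PySem.Set Int) : List String × PySem.Set Int :=
  if h : i < pos.length then
    if pos[i] = "_" then
      match PySem.List.pyGet? id (i : Int) with
      | none => (posList, dead)   -- Python raises IndexError here
      | some (s, _, e) =>
        let comps := PySem.List.slice pos (some ((i : Int) + 1)) (some ((i : Int) + 1 + (e - s + 1)))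
        bLoop pos id (i + 1 + comps.length) (posList ++ [PySem.Str.join "+" comps])
          (PySem.Set.update dead (PySem.List.pyRange ((i : Int) + 1) ((i : Int) + 1 + comps.length) 1))
    else bLoop pos id (i + 1) (posList ++ [pos[i]]) dead
  else (posList, dead)
termination_by pos.length - i

def multiword_alt (token : List String) (pos : List String) (id : List (Int × Int × Int)) : List String × List String :=
  let r := bLoop pos id 0 [] PySem.Set.empty
  (((PySem.List.enumerate token 0).filter (fun p => !(PySem.Set.contains r.2 p.1))).map (·.2), r.1)

-- ===== PRECONDITION & SPEC =====
-- number of rows described by the multiword entry at index i: end - start + 1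
def pvSpan (id : List (Int × Int × Int)) (i : Nat) : Nat :=
  ((id.getD i (0, 0, 0)).2.2 - (id.getD i (0, 0, 0)).1 + 1).toNat

-- Pre_ excludes inputs whose "_" entries are not well-aligned multiword blocks (id
-- start/end consistent with the entry's position, component span in range and free of
-- further "_"), on which A's global-offset arithmetic slices accidental positions or
-- raises IndexError.
def Pre_multiword (token : List String) (pos : List String) (id : List (Int × Int × Int)) : Prop :=
  ∀ i, i < pos.length → pos.getD i "" = "_" →
    i < id.length ∧
    (id.getD i (0, 0, 0)).1 + ((pos.take i).count "_" : Int) = (i : Int) + 1 ∧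
    (id.getD i (0, 0, 0)).1 ≤ (id.getD i (0, 0, 0)).2.2 ∧
    i + pvSpan id i < pos.length ∧
    ∀ j, j ≤ i + pvSpan id i → i < j → pos.getD j "" ≠ "_"

instance (token : List String) (pos : List String) (id : List (Int × Int × Int)) : Decidable (Pre_multiword token pos id) := by
  unfold Pre_multiword; infer_instance

def pvWitness_multiword : List String × List String × (List (Int × Int × Int)) :=
  (["della", "di", "la"], (["_", "ADP", "DET"], [(1, 0, 2), (1, 0, 1), (2, 0, 2)]))

def Spec_multiword (token : List String) (pos : List String) (id : List (Int × Int × Int)) (out : List String × List String) : Prop := out = multiword_alt token pos id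
instance (token : List String) (pos : List String) (id : List (Int × Int × Int)) (out : List String × List String) : Decidable (Spec_multiword token pos id out) := by unfold Spec_multiword; infer_instance

-- ===== CLAIM (what is proved, stated in full; the proofs are below) =====
def Claim_equal_multiword : Prop := ∀ (token : List String) (pos : List String) (id : List (Int × Int × Int)), Dom_multiword token pos id → Pre_multiword token pos id → Spec_multiword token pos id (multiword token pos id)

-- ===== LEMMAS AND PROOFS =====

-- the compound tag written at head position i
def pvTag (pos : List String) (id : List (Int × Int × Int)) (i : Nat) : String :=
  PySem.Str.join "+" ((pos.drop (i + 1)).take (pvSpan id i))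

-- indices deleted by the normalisation: the component span after every "_" entry
def pvDead (pos : List String) (id : List (Int × Int × Int)) : List Int :=
  ((List.range pos.length).filter (fun i => pos.getD i "" == "_")).flatMap
    (fun (h : Nat) => PySem.List.pyRange ((h : Int) + 1) ((h : Int) + 1 + (pvSpan id h : Int)) 1)

-- final value of A's pos after the loop
def pvPosF (pos : List String) (id : List (Int × Int × Int)) : List String :=
  (List.range pos.length).map (fun i => if pos.getD i "" = "_" then pvTag pos id i else pos.getD i "")

-- the surviving entries of pvPosF from index i on
def pvF (pos : List String) (id : List (Int × Int × Int)) (i : Nat) : List String :=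
  if i < pos.length then
    (if (pvDead pos id).contains ((i : Int)) then pvF pos id (i + 1)
     else (pvPosF pos id).getD i "" :: pvF pos id (i + 1))
  else []
termination_by pos.length - i

lemma mem_pvDead (pos : List String) (id : List (Int × Int × Int)) (x : Int) :
    x ∈ pvDead pos id ↔ ∃ h, h < pos.length ∧ pos.getD h "" = "_" ∧ (h : Int) < x ∧ x ≤ (h : Int) + (pvSpan id h : Int) := by
  simp only [pvDead, List.mem_flatMap, List.mem_filter, List.mem_range,
    PySem.List.mem_pyRange_one, beq_iff_eq]
  constructor
  · rintro ⟨h, ⟨hlt, hhd⟩, h1, h2⟩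
    exact ⟨h, hlt, hhd, by omega, by omega⟩
  · rintro ⟨h, hlt, hhd, h1, h2⟩
    exact ⟨h, ⟨hlt, hhd⟩, by omega, by omega⟩

lemma head_not_dead (pos : List String) (id : List (Int × Int × Int))
    (hP : Pre_multiword [] pos id) (i : Nat) (hi : i < pos.length) (hh : pos.getD i "" = "_") :
    ((i : Int) ∈ pvDead pos id) → False := by
  rw [mem_pvDead]
  rintro ⟨h, hlt, hhd, h1, h2⟩
  exact (hP h hlt hhd).2.2.2.2 i (by omega) (by omega) hh

lemma comps_elem_ne (pos : List String) (id : List (Int × Int × Int))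
    (hP : Pre_multiword [] pos id) (i : Nat) (hi : i < pos.length) (hh : pos.getD i "" = "_") :
    ∀ p ∈ (pos.drop (i + 1)).take (pvSpan id i), p ≠ "_" := by
  intro p hp
  have hspan := (hP i hi hh).2.2.2.1
  have hcomp := (hP i hi hh).2.2.2.2
  rw [List.mem_iff_getElem] at hp
  obtain ⟨k, hk, rfl⟩ := hp
  have hk' : k < pvSpan id i := by
    have := List.length_take_le (pvSpan id i) (pos.drop (i+1)); omega
  have hkk : i + 1 + k < pos.length := by omega
  have : ((pos.drop (i + 1)).take (pvSpan id i))[k] = pos[i + 1 + k] := by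
    rw [List.getElem_take, List.getElem_drop]
  rw [this]
  have := hcomp (i + 1 + k) (by omega) (by omega)
  rwa [List.getD_eq_getElem _ _ hkk] at this

lemma join_ne (parts : List String) (hne : parts ≠ []) (hall : ∀ p ∈ parts, p ≠ "_") :
    PySem.Str.join "+" parts ≠ "_" := by
  intro hEq
  have hT : (PySem.Str.join "+" parts).toList = ("_" : String).toList := by rw [hEq]
  rw [PySem.Str.toList_join] at hT
  match parts, hne with
  | [c], _ =>
    simp only [List.map] at hT
    rw [PySem.Chars.join_singleton] at hT
    exact hall c (by simp) (by apply String.ext; exact hT)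
  | c :: c2 :: rest, _ =>
    simp only [List.map] at hT
    rw [PySem.Chars.join_cons_cons] at hT
    have : '+' ∈ (("_" : String).toList) := by
      rw [← hT]; simp
    simp at this

lemma tag_ne (pos : List String) (id : List (Int × Int × Int))
    (hP : Pre_multiword [] pos id) (i : Nat) (hi : i < pos.length) (hh : pos.getD i "" = "_") :
    pvTag pos id i ≠ "_" := by
  have hsle := (hP i hi hh).2.2.1
  have hspan := (hP i hi hh).2.2.2.1
  have h1 : 1 ≤ pvSpan id i := by unfold pvSpan; omega
  apply join_ne
  · have : ((pos.drop (i + 1)).take (pvSpan id i)).length = pvSpan id i := by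
      simp [List.length_take, List.length_drop]; omega
    intro hnil; rw [hnil] at this; simp at this; omega
  · exact comps_elem_ne pos id hP i hi hh

-- [xs[j] for j in range(a, a+k)] when the whole range is in bounds
lemma mapM_pyGet?_range (xs : List String) (k : Nat) : ∀ (a : Nat), a + k ≤ xs.length →
    (PySem.List.pyRange (a : Int) ((a : Int) + (k : Int)) 1).mapM (fun i => PySem.List.pyGet? xs i)
      = some ((xs.drop a).take k) := by
  induction k with
  | zero =>
    intro a ha
    rw [PySem.List.pyRange_one_eq_nil (by omega)]
    simp
  | succ k ih =>
    intro a ha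
    rw [PySem.List.pyRange_one_cons (by omega)]
    have hax : a < xs.length := by omega
    rw [List.mapM_cons]
    have hget : PySem.List.pyGet? xs ((a : Int)) = some xs[a] :=
      PySem.List.pyGet?_ofNat xs a hax
    have harith : ((a : Int)) + 1 = ((a + 1 : Nat) : Int) := by push_cast; ring
    have harith2 : ((a : Int)) + ((k + 1 : Nat) : Int) = ((a + 1 : Nat) : Int) + (k : Int) := by push_cast; ring
    rw [harith2, harith, ih (a + 1) (by omega), hget]
    have : xs.drop a = xs[a] :: xs.drop (a + 1) := List.drop_eq_getElem_cons hax
    rw [this, List.take_succ_cons]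
    rfl

lemma index?_of_first (xs : List String) (v : String) (i : Nat) (hi : i < xs.length)
    (hv : xs[i] = v) (hfirst : ∀ j, (hj : j < i) → xs[j]'(by omega) ≠ v) :
    PySem.List.index? xs v = some i := by
  rw [PySem.List.index?_eq_some_iff]
  refine ⟨xs.take i, xs.drop (i + 1), ?_, by simp [List.length_take]; omega, ?_⟩
  · rw [← hv, List.getElem_cons_drop, List.take_append_drop]
  · intro hmem
    rw [List.mem_iff_getElem] at hmem
    obtain ⟨j, hj, hje⟩ := hmem
    have hjlen : j < i := by
      have := List.length_take_le i xs; simp [List.length_take] at hj; omega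
    rw [List.getElem_take] at hje
    exact hfirst j hjlen hje

lemma pvF_stop (pos : List String) (id : List (Int × Int × Int)) (i : Nat) (h : ¬ i < pos.length) :
    pvF pos id i = [] := by rw [pvF]; simp [h]

lemma pvF_dead (pos : List String) (id : List (Int × Int × Int)) (i : Nat) (h : i < pos.length)
    (hd : (pvDead pos id).contains ((i : Int)) = true) :
    pvF pos id i = pvF pos id (i + 1) := by
  have hm : (i : Int) ∈ pvDead pos id := by simpa using hd
  rw [pvF]; simp [h, hm]

lemma pvF_live (pos : List String) (id : List (Int × Int × Int)) (i : Nat) (h : i < pos.length)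
    (hd : (pvDead pos id).contains ((i : Int)) = false) :
    pvF pos id i = (pvPosF pos id).getD i "" :: pvF pos id (i + 1) := by
  have hm : (i : Int) ∉ pvDead pos id := by simpa using hd
  rw [pvF]; simp [h, hm]

lemma pvF_skip (pos : List String) (id : List (Int × Int × Int)) (d : Nat) : ∀ (a : Nat),
    a + d ≤ pos.length → (∀ j, a ≤ j → j < a + d → ((j : Int) ∈ pvDead pos id)) →
    pvF pos id a = pvF pos id (a + d) := by
  induction d with
  | zero => intro a _ _; rfl
  | succ d ih =>
    intro a ha hj
    have h1 : (pvDead pos id).contains ((a : Int)) = true := by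
      simpa using hj a (by omega) (by omega)
    rw [pvF_dead pos id a (by omega) h1, ih (a + 1) (by omega) (fun j hj1 hj2 => hj j (by omega) (by omega))]
    congr 1; omega

lemma length_pvPosF (pos : List String) (id : List (Int × Int × Int)) :
    (pvPosF pos id).length = pos.length := by simp [pvPosF]

lemma getD_pvPosF (pos : List String) (id : List (Int × Int × Int)) (i : Nat) (h : i < pos.length) :
    (pvPosF pos id).getD i "" = (if pos.getD i "" = "_" then pvTag pos id i else pos.getD i "") := by
  rw [List.getD_eq_getElem _ _ (by simpa [length_pvPosF] using h)]
  simp [pvPosF]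

lemma enum_filter (pos : List String) (id : List (Int × Int × Int)) (m : Nat) : ∀ (i : Nat),
    pos.length - i < m →
    ((PySem.List.enumerate ((pvPosF pos id).drop i) ((i : Int))).filter
        (fun p => !((pvDead pos id).contains p.1))).map (·.2) = pvF pos id i := by
  induction m with
  | zero => omega
  | succ m ih =>
    intro i him
    by_cases h : i < pos.length
    · have hlen : i < (pvPosF pos id).length := by rwa [length_pvPosF]
      rw [← List.getElem_cons_drop hlen, PySem.List.enumerate_cons]
      have hcast : ((i : Int)) + 1 = (((i + 1 : Nat)) : Int) := by push_cast; ring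
      rw [hcast]
      rw [List.filter_cons]
      cases hc : (pvDead pos id).contains ((i : Int)) with
      | true =>
        simp only [hc, Bool.not_true, Bool.false_eq_true, if_false]
        rw [ih (i + 1) (by omega), pvF_dead pos id i h hc]
      | false =>
        simp only [hc, Bool.not_false, if_pos]
        rw [List.map_cons, ih (i + 1) (by omega), pvF_live pos id i h hc,
          List.getD_eq_getElem _ _ hlen]
    · have hge : (pvPosF pos id).length ≤ i := by rw [length_pvPosF]; omega
      rw [List.drop_eq_nil_of_le hge, pvF_stop pos id i h]
      simp [PySem.List.enumerate_nil]


lemma bLoop_char (pos : List String) (id : List (Int × Int × Int))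
    (hP : Pre_multiword [] pos id) (m : Nat) : ∀ (i : Nat) (acc : List String) (dd : PySem.Set Int),
    pos.length - i < m → i ≤ pos.length →
    (∀ k, k < i → pos.getD k "" = "_" → k + pvSpan id k < i) →
    ∃ DD, bLoop pos id i acc dd = (acc ++ pvF pos id i, DD) ∧
      (∀ x : Int, x ∈ DD ↔ x ∈ dd ∨ ∃ h : Nat, i ≤ h ∧ h < pos.length ∧ pos.getD h "" = "_" ∧
        (h : Int) < x ∧ x ≤ (h : Int) + (pvSpan id h : Int)) := by
  induction m with
  | zero => omega
  | succ m ih =>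
    intro i acc dd him hile hbd
    by_cases h : i < pos.length
    · have hgd : pos.getD i "" = pos[i] := List.getD_eq_getElem _ _ h
      by_cases hh : pos[i] = "_"
      · -- multiword head
        have hPre := hP i h (by rw [hgd]; exact hh)
        obtain ⟨hidlt, hstart, hsle, hspanlt, hcomp⟩ := hPre
        rcases hte : id.getD i (0, 0, 0) with ⟨s, mm, e⟩
        have hteq : id[i]'hidlt = (s, mm, e) := by
          rw [← List.getD_eq_getElem id (0,0,0) hidlt, hte]
        have hget : PySem.List.pyGet? id ((i : Int)) = some (s, mm, e) := by
          rw [PySem.List.pyGet?_ofNat id i hidlt, hteq]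
        rw [hte] at hsle; simp at hsle
        have hspan : (pvSpan id i : Int) = e - s + 1 := by
          unfold pvSpan; rw [hte]; simp; omega
        -- the slice of component tags
        have hc1 : ((i : Int) + 1) = (((i + 1 : Nat)) : Int) := by push_cast; ring
        have hc2 : ((i : Int) + 1 + (e - s + 1)) = (((i + 1 : Nat)) : Int) + ((pvSpan id i : Nat) : Int) := by
          rw [hspan]; push_cast; ring
        have hslice : PySem.List.slice pos (some ((i : Int) + 1)) (some ((i : Int) + 1 + (e - s + 1)))
            = (pos.drop (i + 1)).take (pvSpan id i) := by
          rw [hc2, hc1, PySem.List.slice_natCast_add]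
        have hslen : ((pos.drop (i + 1)).take (pvSpan id i)).length = pvSpan id i := by
          simp [List.length_take, List.length_drop]; omega
        rw [bLoop]
        simp only [dif_pos h, if_pos hh, hget, hslice, hslen]
        -- recursive call at i + 1 + span
        have hb' : ∀ k, k < i + 1 + pvSpan id i → pos.getD k "" = "_" → k + pvSpan id k < i + 1 + pvSpan id i := by
          intro k hk hkh
          rcases Nat.lt_trichotomy k i with hki | rfl | hki
          · have := hbd k hki hkh; omega
          · omega
          · exfalso; exact hcomp k (by omega) (by omega) hkh
        obtain ⟨DD, hDD, hDDm⟩ := ih (i + 1 + pvSpan id i)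
          (acc ++ [PySem.Str.join "+" ((pos.drop (i + 1)).take (pvSpan id i))])
          (PySem.Set.update dd (PySem.List.pyRange ((i : Int) + 1) ((i : Int) + 1 + ((pvSpan id i : Nat) : Int)) 1))
          (by omega) (by omega) hb'
        refine ⟨DD, ?_, ?_⟩
        · rw [hDD, List.append_assoc]
          congr 1
          -- pvF i = tag :: pvF (i+1+span)
          have hnotdead : (pvDead pos id).contains ((i : Int)) = false := by
            rw [Bool.eq_false_iff]
            intro hcontra
            exact head_not_dead pos id hP i h (by rw [hgd]; exact hh) (by simpa using hcontra)
          rw [pvF_live pos id i h hnotdead,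
            getD_pvPosF pos id i h, if_pos (by rw [hgd]; exact hh)]
          have hskip : pvF pos id (i + 1) = pvF pos id (i + 1 + pvSpan id i) := by
            rw [pvF_skip pos id (pvSpan id i) (i + 1) (by omega)]
            intro j hj1 hj2
            rw [mem_pvDead]
            exact ⟨i, h, by rw [hgd]; exact hh, by omega, by omega⟩
          rw [hskip]
          simp [pvTag]
        · intro x
          rw [hDDm, PySem.Set.mem_update, PySem.List.mem_pyRange_one]
          constructor
          · rintro (((hx | hx) | ⟨hh', hhge, hhlt, hhhd, hx1, hx2⟩))
            · exact Or.inl hx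
            · exact Or.inr ⟨i, by omega, h, by rw [hgd]; exact hh, by omega, by omega⟩
            · exact Or.inr ⟨hh', by omega, hhlt, hhhd, hx1, hx2⟩
          · rintro (hx | ⟨hh', hhge, hhlt, hhhd, hx1, hx2⟩)
            · exact Or.inl (Or.inl hx)
            · rcases Nat.lt_trichotomy hh' (i + 1 + pvSpan id i) with hlt' | heq' | hgt'
              · rcases Nat.eq_or_lt_of_le hhge with rfl | hgt
                · exact Or.inl (Or.inr ⟨by omega, by omega⟩)
                · exfalso; exact hcomp hh' (by omega) (by omega) hhhd
              · exact Or.inr ⟨hh', by omega, hhlt, hhhd, hx1, hx2⟩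
              · exact Or.inr ⟨hh', by omega, hhlt, hhhd, hx1, hx2⟩
      · -- ordinary row
        rw [bLoop]
        simp only [dif_pos h, if_neg hh]
        obtain ⟨DD, hDD, hDDm⟩ := ih (i + 1) (acc ++ [pos[i]]) dd (by omega) (by omega)
          (by intro k hk hkh
              rcases Nat.lt_trichotomy k i with hki | rfl | hki
              · have := hbd k hki hkh; omega
              · exact absurd (hgd ▸ hkh) hh
              · omega)
        refine ⟨DD, ?_, ?_⟩
        · rw [hDD, List.append_assoc]
          congr 1
          have hnotdead : (pvDead pos id).contains ((i : Int)) = false := by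
            rw [Bool.eq_false_iff]
            intro hcontra
            rw [← Bool.ne_false_iff, Bool.ne_false_iff] at hcontra
            have hmem : (i : Int) ∈ pvDead pos id := by simpa using hcontra
            rw [mem_pvDead] at hmem
            obtain ⟨hh', hhlt, hhhd, hx1, hx2⟩ := hmem
            have := hbd hh' (by omega) hhhd
            omega
          rw [pvF_live pos id i h hnotdead, getD_pvPosF pos id i h, if_neg (by rw [hgd]; exact hh), hgd]
          simp
        · intro x
          rw [hDDm]
          constructor
          · rintro (hx | ⟨hh', hhge, hhlt, hhhd, hx1, hx2⟩)
            · exact Or.inl hx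
            · exact Or.inr ⟨hh', by omega, hhlt, hhhd, hx1, hx2⟩
          · rintro (hx | ⟨hh', hhge, hhlt, hhhd, hx1, hx2⟩)
            · exact Or.inl hx
            · rcases Nat.eq_or_lt_of_le hhge with rfl | hgt
              · exact absurd (hgd ▸ hhhd) hh
              · exact Or.inr ⟨hh', by omega, hhlt, hhhd, hx1, hx2⟩
    · rw [bLoop]
      simp only [dif_neg h]
      refine ⟨dd, ?_, ?_⟩
      · rw [pvF_stop pos id i h, List.append_nil]
      · intro x
        constructor
        · exact Or.inl
        · rintro (hx | ⟨hh', hhge, hhlt, _, _, _⟩)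
          · exact hx
          · omega


lemma cnt_succ (pos : List String) (i : Nat) (h : i < pos.length) :
    (pos.take (i + 1)).count "_" = (pos.take i).count "_" + (if pos.getD i "" = "_" then 1 else 0) := by
  rw [List.take_succ, List.getElem?_eq_getElem h, List.count_append,
    List.getD_eq_getElem _ _ h]
  simp [List.count_singleton]

lemma cnt_nohead (pos : List String) (d : Nat) : ∀ (a : Nat), a + d ≤ pos.length →
    (∀ j, a ≤ j → j < a + d → pos.getD j "" ≠ "_") →
    (pos.take (a + d)).count "_" = (pos.take a).count "_" := by
  induction d with
  | zero => intro a _ _; rfl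
  | succ d ih =>
    intro a ha hj
    have : a + (d + 1) = (a + d) + 1 := by omega
    rw [this, cnt_succ pos (a + d) (by omega), if_neg (hj (a + d) (by omega) (by omega)),
      ih a (by omega) (fun j h1 h2 => hj j h1 (by omega))]
    omega

lemma getD_set_self (xs : List String) (n : Nat) (v : String) (h : n < xs.length) :
    (xs.set n v).getD n "" = v := by
  rw [List.getD_eq_getElem _ _ (by simpa using h), List.getElem_set_self]

lemma getD_set_ne (xs : List String) (n : Nat) (v : String) (i : Nat) (h : i ≠ n) :
    (xs.set n v).getD i "" = xs.getD i "" := by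
  by_cases hi : i < xs.length
  · rw [List.getD_eq_getElem _ _ (by simpa using hi), List.getD_eq_getElem _ _ hi,
      List.getElem_set_ne (by omega)]
  · rw [List.getD_eq_default _ _ (by simpa using hi), List.getD_eq_default _ _ (by omega)]

lemma aLoop_char (pos : List String) (id : List (Int × Int × Int))
    (hP : Pre_multiword [] pos id) : ∀ (fuel : Nat) (b : Nat) (posC : List String) (del : List Int) (nb : Int),
    b ≤ pos.length →
    pos.length - b < fuel →
    posC.length = pos.length →
    (∀ i : Nat, posC.getD i "" = (if i < b ∧ pos.getD i "" = "_" then pvTag pos id i else pos.getD i "")) →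
    (∀ x : Int, x ∈ del ↔ ∃ h : Nat, h < b ∧ pos.getD h "" = "_" ∧ (h : Int) < x ∧ x ≤ (h : Int) + (pvSpan id h : Int)) →
    (∀ k, k < b → pos.getD k "" = "_" → k + pvSpan id k < b) →
    nb = ((pos.take b).count "_" : Int) →
    ∃ delF, aLoop id fuel posC del nb = (pvPosF pos id, delF) ∧
      (∀ x : Int, x ∈ delF ↔ x ∈ pvDead pos id) := by
  intro fuel
  induction fuel with
  | zero => omega
  | succ fuel ih =>
    intro b posC del nb hble hfuel hlen hinv hdel hbd hnb
    by_cases hex : ∃ h, b ≤ h ∧ h < pos.length ∧ pos.getD h "" = "_"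
    · -- there is an unprocessed "_": the loop body runs
      have h0 := Nat.find_spec hex
      set h0n := Nat.find hex with hh0n
      obtain ⟨hbh0, hh0lt, hh0hd⟩ := h0
      have hmin : ∀ j, b ≤ j → j < h0n → pos.getD j "" ≠ "_" := by
        intro j hj1 hj2 hjh
        exact Nat.find_min hex hj2 ⟨hj1, by omega, hjh⟩
      have hClen : h0n < posC.length := by omega
      have hC0 : posC[h0n] = "_" := by
        have := hinv h0n
        rw [if_neg (by omega), hh0hd] at this
        rwa [List.getD_eq_getElem _ _ hClen] at this
      have hfirst : ∀ j, (hj : j < h0n) → posC[j]'(by omega) ≠ "_" := by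
        intro j hj
        have hjn : j < pos.length := by omega
        have := hinv j
        rw [← List.getD_eq_getElem _ _ (show j < posC.length by omega)]
        rw [this]
        split_ifs with hc
        · exact tag_ne pos id hP j hjn hc.2
        · intro hjh
          rcases Nat.lt_or_ge j b with hjb | hjb
          · exact hc ⟨hjb, hjh⟩
          · exact hmin j hjb hj hjh
      have hcond : PySem.Set.contains (PySem.Set.ofList posC) "_" = true := by
        rw [PySem.Set.contains_iff, PySem.Set.mem_ofList]
        exact hC0 ▸ List.getElem_mem hClen
      have hidx : PySem.List.index? posC "_" = some h0n :=
        index?_of_first posC "_" h0n hClen hC0 hfirst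
      obtain ⟨hidlt, hstart, hsle, hspanlt, hcomp⟩ := hP h0n hh0lt hh0hd
      rcases hte : id.getD h0n (0, 0, 0) with ⟨s, mm, e⟩
      rw [hte] at hsle hstart; simp at hsle hstart
      have hget : PySem.List.pyGet? id ((h0n : Int)) = some (s, mm, e) := by
        rw [PySem.List.pyGet?_ofNat id h0n hidlt, ← List.getD_eq_getElem id (0,0,0) hidlt, hte]
      have hspan : ((pvSpan id h0n : Nat) : Int) = e - s + 1 := by
        unfold pvSpan; rw [hte]; simp; omega
      -- nb equals the count of "_" before h0n
      have hcnt0 : (pos.take h0n).count "_" = (pos.take b).count "_" := by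
        have : h0n = b + (h0n - b) := by omega
        rw [this, cnt_nohead pos (h0n - b) b (by omega)
          (fun j h1 h2 => hmin j h1 (by omega))]
      have hnb0 : s + nb = ((h0n : Int)) + 1 := by
        rw [hnb, ← hcnt0]; push_cast at hstart ⊢; omega
      have hA : s + nb = (((h0n + 1 : Nat)) : Int) := by push_cast; omega
      have hB : e + nb + 1 = (((h0n + 1 : Nat)) : Int) + ((pvSpan id h0n : Nat) : Int) := by
        rw [hspan]; push_cast at hnb0 ⊢; omega
      have hmapm : (PySem.List.pyRange (s + nb) (e + nb + 1) 1).mapM (fun i => PySem.List.pyGet? posC i)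
          = some ((posC.drop (h0n + 1)).take (pvSpan id h0n)) := by
        rw [hA, hB, mapM_pyGet?_range posC (pvSpan id h0n) (h0n + 1) (by omega)]
      have hcompseq : (posC.drop (h0n + 1)).take (pvSpan id h0n) = (pos.drop (h0n + 1)).take (pvSpan id h0n) := by
        apply List.ext_getElem
        · simp [List.length_take, List.length_drop]; omega
        · intro k hk1 hk2
          rw [List.getElem_take, List.getElem_drop, List.getElem_take, List.getElem_drop]
          have hklt : h0n + 1 + k < pos.length := by
            simp [List.length_take, List.length_drop] at hk1; omega
          rw [← List.getD_eq_getElem posC "" (by omega), ← List.getD_eq_getElem pos "" hklt,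
            hinv (h0n + 1 + k), if_neg (by omega)]
      have hjoin : PySem.Str.join "+" ((pos.drop (h0n + 1)).take (pvSpan id h0n)) = pvTag pos id h0n := rfl
      -- invariant for the next iteration
      have hble' : h0n + 1 + pvSpan id h0n ≤ pos.length := by omega
      obtain ⟨delF, hrec, hmem⟩ := ih (h0n + 1 + pvSpan id h0n)
        (posC.set h0n (pvTag pos id h0n))
        (del ++ PySem.List.pyRange (s + nb) (e + nb + 1) 1)
        (nb + 1)
        hble' (by omega) (by simpa using hlen)
        (by
          intro i
          rcases eq_or_ne i h0n with rfl | hne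
          · rw [getD_set_self posC h0n (pvTag pos id h0n) hClen, if_pos ⟨by omega, hh0hd⟩]
          · rw [getD_set_ne posC h0n (pvTag pos id h0n) i hne, hinv i]
            split_ifs with hc1 hc2 hc2
            · rfl
            · exact absurd ⟨by omega, hc1.2⟩ hc2
            · exfalso
              rcases Nat.lt_or_ge i b with hib | hib
              · exact hc1 ⟨hib, hc2.2⟩
              · rcases Nat.lt_or_ge i h0n with hih | hih
                · exact hmin i hib hih hc2.2
                · exact hcomp i (by omega) (by omega) hc2.2
            · rfl)
        (by
          intro x
          rw [List.mem_append, hdel x, hA, hB, PySem.List.mem_pyRange_one]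
          constructor
          · rintro (⟨h, hhb, hhh, hx1, hx2⟩ | ⟨hx1, hx2⟩)
            · exact ⟨h, by omega, hhh, hx1, hx2⟩
            · exact ⟨h0n, by omega, hh0hd, by push_cast at hx1 hx2 ⊢; omega, by push_cast at hx1 hx2 ⊢; omega⟩
          · rintro ⟨h, hhb, hhh, hx1, hx2⟩
            rcases Nat.lt_or_ge h b with hhb' | hhb'
            · exact Or.inl ⟨h, hhb', hhh, hx1, hx2⟩
            · rcases Nat.lt_or_ge h h0n with hhh0 | hhh0
              · exact absurd hhh (hmin h hhb' hhh0)
              · rcases Nat.eq_or_lt_of_le hhh0 with rfl | hgt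
                · exact Or.inr ⟨by push_cast; omega, by push_cast; omega⟩
                · exact absurd hhh (hcomp h (by omega) (by omega)))
        (by
          intro k hk hkh
          rcases Nat.lt_or_ge k b with hkb | hkb
          · have := hbd k hkb hkh; omega
          · rcases Nat.lt_or_ge k h0n with hkh0 | hkh0
            · exact absurd hkh (hmin k hkb hkh0)
            · rcases Nat.eq_or_lt_of_le hkh0 with rfl | hgt
              · omega
              · exact absurd hkh (hcomp k (by omega) (by omega)))
        (by
          have e1 : (pos.take (h0n + 1 + pvSpan id h0n)).count "_" = (pos.take (h0n + 1)).count "_" := by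
            have : h0n + 1 + pvSpan id h0n = (h0n + 1) + pvSpan id h0n := by omega
            rw [this, cnt_nohead pos (pvSpan id h0n) (h0n + 1) (by omega)
              (fun j h1 h2 => hcomp j (by omega) (by omega))]
          have e2 : (pos.take (h0n + 1)).count "_" = (pos.take h0n).count "_" + 1 := by
            rw [cnt_succ pos h0n hh0lt, if_pos hh0hd]
          rw [e1, e2, hcnt0]
          push_cast
          omega)
      refine ⟨delF, ?_, hmem⟩
      rw [aLoop]
      simp only [hcond, if_true, hidx, hget, hmapm, hcompseq, hjoin]
      exact hrec
    · -- no "_" left at or after b: the loop exits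
      push_neg at hex
      have hnomem : PySem.Set.contains (PySem.Set.ofList posC) "_" = false := by
        rw [Bool.eq_false_iff]
        intro hc
        rw [PySem.Set.contains_iff, PySem.Set.mem_ofList, List.mem_iff_getElem] at hc
        obtain ⟨j, hj, hje⟩ := hc
        have hjn : j < pos.length := by omega
        have := hinv j
        rw [List.getD_eq_getElem _ _ hj, hje] at this
        split_ifs at this with hc1
        · exact tag_ne pos id hP j hjn hc1.2 this.symm
        · rcases Nat.lt_or_ge j b with hjb | hjb
          · exact hc1 ⟨hjb, this.symm⟩
          · exact hex j hjb hjn this.symm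
      refine ⟨del, ?_, ?_⟩
      · rw [aLoop]
        simp only [hnomem, Bool.false_eq_true, if_false]
        congr 1
        apply List.ext_getElem
        · rw [hlen, length_pvPosF]
        · intro i hi1 hi2
          have hin : i < pos.length := by rw [length_pvPosF] at hi2; omega
          rw [← List.getD_eq_getElem posC "" hi1, ← List.getD_eq_getElem (pvPosF pos id) "" hi2,
            hinv i, getD_pvPosF pos id i hin]
          split_ifs with hc1 hc2 hc2
          · rfl
          · exact absurd hc1.2 hc2
          · exfalso
            rcases Nat.lt_or_ge i b with hib | hib
            · exact hc1 ⟨hib, hc2⟩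
            · exact hex i hib hin hc2
          · rfl
      · intro x
        rw [hdel x, mem_pvDead]
        constructor
        · rintro ⟨h, hhb, hhh, hx1, hx2⟩
          exact ⟨h, by omega, hhh, hx1, hx2⟩
        · rintro ⟨h, hhlt, hhh, hx1, hx2⟩
          rcases Nat.lt_or_ge h b with hhb | hhb
          · exact ⟨h, hhb, hhh, hx1, hx2⟩
          · exact absurd hhh (hex h hhb hhlt)


theorem multiword_spec : Claim_equal_multiword := by
  intro token pos id hD hP
  have hP' : Pre_multiword [] pos id := hP
  unfold Spec_multiword multiword multiword_alt
  obtain ⟨delF, hA, hAm⟩ := aLoop_char pos id hP' (pos.length + 1) 0 pos [] 0 (by omega) (by omega) rfl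
    (by intro i; rw [if_neg (by omega)])
    (by intro x; simp)
    (by intro k hk; omega)
    (by simp)
  obtain ⟨DD, hB, hBm⟩ := bLoop_char pos id hP' (pos.length + 1) 0 [] PySem.Set.empty (by omega) (by omega)
    (by intro k hk; omega)
  rw [hA, hB]
  have hmemDD : ∀ x : Int, x ∈ DD ↔ x ∈ pvDead pos id := by
    intro x
    rw [hBm, mem_pvDead]
    constructor
    · rintro (hx | ⟨h, _, hlt, hhd, h1, h2⟩)
      · exact absurd hx (by simp [PySem.Set.empty])
      · exact ⟨h, hlt, hhd, h1, h2⟩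
    · rintro ⟨h, hlt, hhd, h1, h2⟩
      exact Or.inr ⟨h, by omega, hlt, hhd, h1, h2⟩
  have hcc : ∀ x : Int, delF.contains x = PySem.Set.contains DD x := by
    intro x
    rw [Bool.eq_iff_iff, PySem.Set.contains_iff]
    simp only [List.contains_iff_mem]
    rw [hAm, hmemDD]
  have htok : ∀ (tk : List String),
      ((PySem.List.enumerate tk 0).filter (fun p => !(delF.contains p.1))).map (·.2)
        = ((PySem.List.enumerate tk 0).filter (fun p => !(PySem.Set.contains DD p.1))).map (·.2) := by
    intro tk
    rw [List.filter_congr (fun x _ => by rw [hcc x.1])]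
  have hposL : ((PySem.List.enumerate (pvPosF pos id) 0).filter (fun p => !(delF.contains p.1))).map (·.2)
      = pvF pos id 0 := by
    have hcc2 : ∀ (x : Int × String), (!(delF.contains x.1)) = !((pvDead pos id).contains x.1) := by
      intro x
      rw [hcc x.1]
      congr 1
      rw [Bool.eq_iff_iff, PySem.Set.contains_iff]
      simp only [List.contains_iff_mem]
      rw [hmemDD x.1]
    rw [List.filter_congr (fun x _ => hcc2 x)]
    have := enum_filter pos id (pos.length + 1) 0 (by omega)
    simpa using this
  simp only [htok token, hposL, List.nil_append]
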